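-- pv_equiv track=rewrite | github.com/KoalaWithGarlicHead/DBLP_Author_Name_Disambiguation | code002/Line/do_All.py | getContrast
-- ===== SOURCE A (Python) =====
-- def getContrast(contrast_data):
--
--     contrastFileData = contrast_data.split('\n')[:-1]
--     contrast = []
--     p = 0
--     count = 0
--     for ele in contrastFileData:
--         pCurrent = ele.split(' ')[1]
--         if pCurrent != p:
--             count += 1
--             p = pCurrent
--         contrast.append(count)
--     return contrast
-- ===== SOURCE B (Python) =====
-- def getContrast(contrast_data):
--     lines = contrast_data.split('\n')[:-1]
--     keys = [e.split(' ')[1] for e in lines]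
--     contrast = []
--     group = 0
--     i = 0
--     n = len(keys)
--     while i < n:
--         j = i + 1
--         while j < n and keys[j] == keys[i]:
--             j += 1
--         group += 1
--         contrast.extend([group] * (j - i))
--         i = j
--     return contrast
-- ===== Notes on version B (the rewrite author's own statement) =====
-- stated objective: alternative
-- what changed: B precomputes the list of second tokens once, then scans it run by run (two-pointer while loops) and emits each group id as a repeated block, instead of A's per-element fold with an int-0 sentinel compared against strings.
import Mathlib
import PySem

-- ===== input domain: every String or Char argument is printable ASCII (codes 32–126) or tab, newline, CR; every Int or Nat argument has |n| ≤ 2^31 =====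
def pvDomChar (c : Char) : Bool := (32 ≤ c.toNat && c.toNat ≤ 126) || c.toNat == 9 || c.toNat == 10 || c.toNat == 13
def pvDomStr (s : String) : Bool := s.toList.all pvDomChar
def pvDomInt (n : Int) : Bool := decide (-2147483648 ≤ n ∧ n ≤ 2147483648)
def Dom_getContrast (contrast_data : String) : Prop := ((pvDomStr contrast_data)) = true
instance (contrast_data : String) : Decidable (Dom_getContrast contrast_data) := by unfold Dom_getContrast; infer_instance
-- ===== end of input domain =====

-- B replaces A's per-element sentinel fold with a precomputed key list scanned run by run; alternative decomposition, same cost.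


-- ===== PORT A =====
-- s.split(sep) for the non-empty literal separators used here: split? is always
-- 'some' for a non-empty sep (none only on ValueError sep=""), so getD never fires.
def pySplit (s sep : String) : List String := (PySem.Str.split? s sep).getD []

-- A's loop: p holds the int 0 sentinel initially, then the last seen second token;
-- modelled as Option String (none = the int sentinel, which never equals a string).
def gcLoopA : List String → Option String → Int → List Int → List Int
  | [], _, _, acc => acc.reverse
  | ele :: rest, p, count, acc =>
    match PySem.List.pyGet? (pySplit ele " ") 1 with
    | none => acc.reverse   -- IndexError in Python; outside Pre_
    | some pCurrent =>
      if some pCurrent ≠ p then gcLoopA rest (some pCurrent) (count + 1) ((count + 1) :: acc)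
      else gcLoopA rest p count (count :: acc)

def getContrast (contrast_data : String) : List Int :=
  gcLoopA (PySem.List.slice (pySplit contrast_data "\n") none (some (-1))) none 0 []

-- ===== PORT B =====
-- B's outer while loop over runs of equal keys; the inner while-scan for j is the
-- takeWhile/dropWhile split of the remaining key list.
def gcRuns : List (Option String) → Int → List Int
  | [], _ => []
  | k :: rest, g =>
    List.replicate ((rest.takeWhile (fun x => x == k)).length + 1) (g + 1)
      ++ gcRuns (rest.dropWhile (fun x => x == k)) (g + 1)
termination_by ks _ => ks.length
decreasing_by
  exact Nat.lt_succ_of_le (List.length_dropWhile_le _ _)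

def getContrast_alt (contrast_data : String) : List Int :=
  let lines := PySem.List.slice (pySplit contrast_data "\n") none (some (-1))
  gcRuns (lines.map (fun e => PySem.List.pyGet? (pySplit e " ") 1)) 0

-- ===== PRECONDITION & SPEC =====
-- Pre_ excludes exactly the inputs where Python A raises IndexError: a kept line
-- whose split on a single space yields fewer than two pieces.
def Pre_getContrast (contrast_data : String) : Prop :=
  ∀ e ∈ (pySplit contrast_data "\n").dropLast,
    (PySem.List.pyGet? (pySplit e " ") 1).isSome = true
instance (contrast_data : String) : Decidable (Pre_getContrast contrast_data) := by
  unfold Pre_getContrast; infer_instance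

def pvWitness_getContrast : String := "a b\nc b\nd e\n"

def Spec_getContrast (contrast_data : String) (out : List Int) : Prop := out = getContrast_alt contrast_data
instance (contrast_data : String) (out : List Int) : Decidable (Spec_getContrast contrast_data out) := by unfold Spec_getContrast; infer_instance

-- ===== CLAIM (what is proved, stated in full; the proofs are below) =====
def Claim_equal_getContrast : Prop := ∀ (contrast_data : String), Dom_getContrast contrast_data → Pre_getContrast contrast_data → Spec_getContrast contrast_data (getContrast contrast_data)

-- ===== LEMMAS AND PROOFS =====

-- A's loop re-expressed over the list of (optional) second tokens.
def gcK : List (Option String) → Option String → Int → List Int → List Int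
  | [], _, _, acc => acc.reverse
  | none :: _, _, _, acc => acc.reverse
  | some k :: rest, p, c, acc =>
    if some k ≠ p then gcK rest (some k) (c + 1) ((c + 1) :: acc)
    else gcK rest p c (c :: acc)

lemma gcLoopA_eq_gcK (lines : List String) :
    ∀ p c acc, gcLoopA lines p c acc
      = gcK (lines.map (fun e => PySem.List.pyGet? (pySplit e " ") 1)) p c acc := by
  induction lines with
  | nil => intro p c acc; rfl
  | cons ele rest ih =>
    intro p c acc
    simp only [gcLoopA, List.map_cons]
    cases h : PySem.List.pyGet? (pySplit ele " ") 1 with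
    | none => rfl
    | some k =>
      simp only [gcK]
      split_ifs with hk
      · exact ih _ _ _
      · exact ih _ _ _

lemma head?_dropWhile_false {α : Type} (q : α → Bool) :
    ∀ (l : List α) (a : α), (l.dropWhile q).head? = some a → q a = false := by
  intro l
  induction l with
  | nil => intro a h; simp at h
  | cons x xs ih =>
    intro a h
    by_cases hx : q x
    · exact ih a (by simpa [List.dropWhile_cons, hx] using h)
    · simp only [List.dropWhile_cons] at h
      rw [if_neg (by simp [hx])] at h
      simp at h
      rw [← h]; simpa using hx

lemma gcK_run (x : String) :
    ∀ (ks : List (Option String)) (c : Int) (acc : List Int),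
      gcK ks (some x) c acc
        = gcK (ks.dropWhile (fun y => y == some x)) (some x) c
            (List.replicate (ks.takeWhile (fun y => y == some x)).length c ++ acc) := by
  intro ks
  induction ks with
  | nil => intro c acc; simp
  | cons k rest ih =>
    intro c acc
    by_cases hk : k = some x
    · subst hk
      simp only [List.takeWhile_cons, List.dropWhile_cons, beq_self_eq_true, if_true]
      have step : gcK (some x :: rest) (some x) c acc = gcK rest (some x) c (c :: acc) := by
        simp [gcK]
      rw [step, ih c (c :: acc)]
      congr 1
      simp [List.replicate_succ' ]
    · have hb : (k == some x) = false := by simpa using hk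
      simp only [List.takeWhile_cons, List.dropWhile_cons, hb]
      simp

lemma gcK_eq_gcRuns :
    ∀ (n : ℕ) (ks : List (Option String)) (p : Option String) (c : Int) (acc : List Int),
      ks.length ≤ n →
      (∀ y ∈ ks, y ≠ none) →
      (∀ k, ks.head? = some k → k ≠ p) →
      gcK ks p c acc = acc.reverse ++ gcRuns ks c := by
  intro n
  induction n with
  | zero =>
    intro ks p c acc hlen _ _
    have : ks = [] := List.length_eq_zero_iff.mp (Nat.le_zero.mp hlen)
    subst this; simp [gcK, gcRuns]
  | succ n ih =>
    intro ks p c acc hlen hsome hhead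
    cases ks with
    | nil => simp [gcK, gcRuns]
    | cons k rest =>
      obtain ⟨x, rfl⟩ : ∃ x, k = some x := by
        cases k with
        | none => exact absurd rfl (hsome none (by simp))
        | some x => exact ⟨x, rfl⟩
      have hne : some x ≠ p := hhead (some x) rfl
      have step : gcK (some x :: rest) p c acc
          = gcK rest (some x) (c + 1) ((c + 1) :: acc) := by
        simp [gcK, hne]
      rw [step, gcK_run x rest (c + 1) ((c + 1) :: acc)]
      set rest' := rest.dropWhile (fun y => y == some x) with hrest'
      set m := (rest.takeWhile (fun y => y == some x)).length with hm
      have hlen' : rest'.length ≤ n := by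
        calc rest'.length ≤ rest.length := List.length_dropWhile_le _ _
          _ ≤ n := by simpa using Nat.lt_succ_iff.mp (Nat.lt_of_lt_of_le (Nat.lt_succ_of_le (Nat.le_refl _)) hlen)
      have hsome' : ∀ y ∈ rest', y ≠ none := fun y hy =>
        hsome y (List.mem_cons_of_mem _ ((rest.dropWhile_sublist _).mem hy))
      have hhead' : ∀ k', rest'.head? = some k' → k' ≠ some x := by
        intro k' hk' hcontra
        have := head?_dropWhile_false (fun y => y == some x) rest k' hk'
        rw [hcontra] at this; simp at this
      rw [ih rest' (some x) (c + 1) _ hlen' hsome' hhead']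
      simp only [gcRuns, ← hrest', ← hm]
      simp [List.replicate_succ, List.reverse_replicate]

-- ===== VERDICT (by name: the statement is the Claim_ definition above) =====
theorem getContrast_spec : Claim_equal_getContrast := by
  intro s _ hpre
  unfold Spec_getContrast getContrast getContrast_alt
  simp only [PySem.List.slice_to_neg_one]
  rw [gcLoopA_eq_gcK]
  set lines := (pySplit s "\n").dropLast with hlines
  set ks := lines.map (fun e => PySem.List.pyGet? (pySplit e " ") 1) with hks
  have hsome : ∀ y ∈ ks, y ≠ none := by
    intro y hy
    rcases List.mem_map.mp hy with ⟨e, he, rfl⟩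
    have := hpre e he
    intro hn; rw [hn] at this; simp at this
  have hhead : ∀ k, ks.head? = some k → k ≠ (none : Option String) := by
    intro k hk
    exact hsome k (List.mem_of_mem_head? hk)
  rw [gcK_eq_gcRuns ks.length ks none 0 [] (Nat.le_refl _) hsome hhead]
  simp
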